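-- pv_equiv track=rewrite | github.com/DanielNoble96/Software-Design-Class-Projects | BabyNames.py | less_popular
-- ===== SOURCE A (Python) =====
-- def less_popular(names_dictionary):
--     # Return a list of all names that were less popular in every decade
--     names_list = []
--     for name in names_dictionary:
--         false_counter = 0
--         for index in range(1, len(names_dictionary[name])):
--             # Count number of times that name was not less popular in subsequent decade
--             if (names_dictionary[name][index] <= names_dictionary[name][index - 1]):
--                 false_counter += 1
--         # Add name to list if it was always less popular in subsequent decades
--         if false_counter == 0:
--             names_list.append(name)
--
--     return names_list
-- ===== SOURCE B (Python) =====
-- def less_popular(names_dictionary):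
--     # Strictly increasing ranks <=> already in sorted order and all values distinct.
--     result = []
--     for name, values in names_dictionary.items():
--         if values == sorted(values) and len(set(values)) == len(values):
--             result.append(name)
--     return result
-- ===== Notes on version B (the rewrite author's own statement) =====
-- stated objective: alternative
-- what changed: Replaces A's indexed consecutive-pair violation counter with a sort-then-compare plus distinctness (set-size) test per name, iterating dict items directly; Pre_ excludes association lists with duplicate keys, which do not correspond to a Python dict (dict keys are unique).
import Mathlib
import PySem

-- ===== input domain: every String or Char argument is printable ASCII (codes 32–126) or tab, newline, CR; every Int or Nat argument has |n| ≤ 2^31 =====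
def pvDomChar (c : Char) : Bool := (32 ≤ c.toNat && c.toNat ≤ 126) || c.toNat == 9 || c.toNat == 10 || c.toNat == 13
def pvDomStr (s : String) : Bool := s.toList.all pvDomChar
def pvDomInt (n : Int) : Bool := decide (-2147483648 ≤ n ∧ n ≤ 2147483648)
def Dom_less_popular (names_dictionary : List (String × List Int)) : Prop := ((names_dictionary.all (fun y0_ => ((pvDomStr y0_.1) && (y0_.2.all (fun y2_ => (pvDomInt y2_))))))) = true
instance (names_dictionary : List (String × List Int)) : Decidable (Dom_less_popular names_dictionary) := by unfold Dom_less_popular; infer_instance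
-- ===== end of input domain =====

-- B replaces A's consecutive-pair violation counter with a per-name sort-then-compare
-- plus distinctness (set-size) test (alternative decomposition, similar cost).


-- ===== PORT A =====
-- A's inner loop: count of indices 1 ≤ index < len(values) with values[index] <= values[index-1]
def lpFalseCounter (values : List Int) : Int :=
  (PySem.List.pyRange 1 (values.length : Int) 1).foldl
    (fun false_counter index =>
      if PySem.List.pyGetD values index 0 ≤ PySem.List.pyGetD values (index - 1) 0 then
        false_counter + 1
      else false_counter) 0

def less_popular (names_dictionary : List (String × List Int)) : List String :=
  (names_dictionary.map Prod.fst).foldl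
    (fun names_list name =>
      if lpFalseCounter (PySem.Dict.getD (PySem.Dict.mk names_dictionary) name []) = 0 then
        names_list ++ [name]
      else names_list) []

-- ===== PORT B =====
def less_popular_alt (names_dictionary : List (String × List Int)) : List String :=
  names_dictionary.foldl
    (fun result p =>
      if p.2 = PySem.List.sorted p.2 (fun x => x) ∧
          (PySem.Set.ofList p.2).length = p.2.length then
        result ++ [p.1]
      else result) []

-- ===== PRECONDITION & SPEC =====
-- Pre_ excludes association lists with duplicate keys: they do not correspond to any
-- Python dict (dict keys are unique), so A's behaviour there is not defined by the source.
def Pre_less_popular (names_dictionary : List (String × List Int)) : Prop :=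
  (names_dictionary.map Prod.fst).Nodup
instance (names_dictionary : List (String × List Int)) : Decidable (Pre_less_popular names_dictionary) := by unfold Pre_less_popular; infer_instance

def pvWitness_less_popular : (List (String × List Int)) :=
  [("anne", [1, 2, 3]), ("bob", [3, 1]), ("cal", [])]

def Spec_less_popular (names_dictionary : List (String × List Int)) (out : List String) : Prop := out = less_popular_alt names_dictionary
instance (names_dictionary : List (String × List Int)) (out : List String) : Decidable (Spec_less_popular names_dictionary out) := by unfold Spec_less_popular; infer_instance

-- ===== CLAIM (what is proved, stated in full; the proofs are below) =====
def Claim_equal_less_popular : Prop := ∀ (names_dictionary : List (String × List Int)), Dom_less_popular names_dictionary → Pre_less_popular names_dictionary → Spec_less_popular names_dictionary (less_popular names_dictionary)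

-- ===== LEMMAS AND PROOFS =====

-- A's counter is zero exactly when the values are strictly increasing.
theorem lpFalseCounter_zero_iff (v : List Int) :
    lpFalseCounter v = 0 ↔ v.Pairwise (· < ·) := by
  unfold lpFalseCounter
  rw [PySem.List.foldl_ite_add_one]
  rw [← List.isChain_iff_pairwise, List.isChain_iff_getElem]
  constructor
  · intro h i hi
    have hcount : (PySem.List.pyRange 1 (v.length : Int) 1).countP
        (fun index => decide (PySem.List.pyGetD v index 0 ≤ PySem.List.pyGetD v (index - 1) 0)) = 0 := by
      omega
    rw [List.countP_eq_zero] at hcount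
    have hlen : ((i : Int) + 1) < (v.length : Int) := by omega
    have hm : ((i : Int) + 1) ∈ PySem.List.pyRange 1 (v.length : Int) 1 := by
      rw [PySem.List.mem_pyRange_one]
      exact ⟨by omega, hlen⟩
    have hx := hcount _ hm
    simp only [decide_eq_true_eq] at hx
    rw [PySem.List.pyGetD_eq_getElem v 0 (by omega) hlen,
        PySem.List.pyGetD_eq_getElem v 0 (by omega) (by omega)] at hx
    have h1 : ((i : Int) + 1).toNat = i + 1 := by omega
    have h2 : ((i : Int) + 1 - 1).toNat = i := by omega
    simp only [h1, h2] at hx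
    omega
  · intro h
    have hz : (PySem.List.pyRange 1 (v.length : Int) 1).countP
        (fun index => decide (PySem.List.pyGetD v index 0 ≤ PySem.List.pyGetD v (index - 1) 0)) = 0 := by
      rw [List.countP_eq_zero]
      intro j hj
      rw [PySem.List.mem_pyRange_one] at hj
      obtain ⟨hj1, hj2⟩ := hj
      simp only [decide_eq_true_eq, not_le]
      rw [PySem.List.pyGetD_eq_getElem v 0 (by omega) hj2,
          PySem.List.pyGetD_eq_getElem v 0 (by omega) (by omega)]
      have hlt := h (j - 1).toNat (by omega)
      convert hlt using 2
      omega
    omega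

-- set(xs) keeps a sublist of xs
theorem ofList_sublist_aux (xs s : List Int) :
    ∃ t, xs.foldl PySem.Set.add s = s ++ t ∧ t.Sublist xs := by
  induction xs generalizing s with
  | nil => exact ⟨[], by simp⟩
  | cons x xs ih =>
    obtain ⟨t, ht, hts⟩ := ih (PySem.Set.add s x)
    by_cases hc : x ∈ s
    · have hadd : PySem.Set.add s x = s := by simp [PySem.Set.add, hc]
      exact ⟨t, by simpa [hadd] using ht, hts.cons x⟩
    · have hadd : PySem.Set.add s x = s ++ [x] := by simp [PySem.Set.add, hc]
      refine ⟨x :: t, ?_, hts.cons₂ x⟩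
      simp only [List.foldl_cons, hadd] at ht ⊢
      rw [ht]
      simp

theorem ofList_sublist (xs : List Int) : (PySem.Set.ofList xs).Sublist xs := by
  rw [PySem.Set.ofList_eq_foldl]
  obtain ⟨t, ht, hts⟩ := ofList_sublist_aux xs []
  rw [ht]
  simpa using hts

theorem ofList_length_iff (xs : List Int) :
    (PySem.Set.ofList xs).length = xs.length ↔ xs.Nodup := by
  constructor
  · intro h
    have := (ofList_sublist xs).eq_of_length h
    rw [← this]
    exact PySem.Set.nodup_ofList xs
  · intro h
    refine le_antisymm ((ofList_sublist xs).length_le) ?_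
    have hsub : xs ⊆ PySem.Set.ofList xs := fun y hy => (PySem.Set.mem_ofList xs y).mpr hy
    exact (List.subperm_of_subset h hsub).length_le

-- B's per-name test is also "strictly increasing".
theorem btest_iff (v : List Int) :
    (v = PySem.List.sorted v (fun x => x) ∧ (PySem.Set.ofList v).length = v.length)
      ↔ v.Pairwise (· < ·) := by
  rw [ofList_length_iff]
  constructor
  · rintro ⟨hs, hn⟩
    have hple : v.Pairwise (fun a b : Int => a ≤ b) := by
      rw [hs]; exact PySem.List.sorted_pairwise v (fun x => x)
    exact (hple.and hn).imp (fun h => lt_of_le_of_ne h.1 h.2)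
  · intro h
    refine ⟨?_, h.imp ne_of_lt⟩
    exact (PySem.List.sorted_eq_self_of_pairwise v (fun x => x)
      (h.imp le_of_lt)).symm

-- with unique keys, looking a pair's key up in the full dict returns its value
theorem lookup_nodup (d : List (String × List Int)) (hd : (d.map Prod.fst).Nodup) :
    ∀ p ∈ d, PySem.Dict.getD (PySem.Dict.mk d) p.1 [] = p.2 := by
  induction d with
  | nil => intro p hp; cases hp
  | cons q d ih =>
    simp only [List.map_cons, List.nodup_cons] at hd
    intro p hp
    rcases List.mem_cons.mp hp with hpq | hp
    · rw [hpq]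
      simp [PySem.Dict.getD, PySem.Dict.get?]
    · have hne : q.1 ≠ p.1 := fun h => hd.1 (h ▸ List.mem_map_of_mem hp)
      have := ih hd.2 p hp
      simpa [PySem.Dict.getD, PySem.Dict.get?, List.find?_cons, hne] using this

theorem fold_eq (full : List (String × List Int)) :
    ∀ (t : List (String × List Int)) (acc : List String),
      (∀ p ∈ t, PySem.Dict.getD (PySem.Dict.mk full) p.1 [] = p.2) →
      (t.map Prod.fst).foldl
        (fun names_list name =>
          if lpFalseCounter (PySem.Dict.getD (PySem.Dict.mk full) name []) = 0 then
            names_list ++ [name]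
          else names_list) acc
      = t.foldl
        (fun result p =>
          if p.2 = PySem.List.sorted p.2 (fun x => x) ∧
              (PySem.Set.ofList p.2).length = p.2.length then
            result ++ [p.1]
          else result) acc := by
  intro t
  induction t with
  | nil => intro acc _; rfl
  | cons p t ih =>
    intro acc h
    have hp := h p (List.mem_cons_self)
    simp only [List.map_cons, List.foldl_cons, hp]
    rw [if_congr ((lpFalseCounter_zero_iff p.2).trans (btest_iff p.2).symm) rfl rfl]
    exact ih _ (fun q hq => h q (List.mem_cons_of_mem _ hq))

-- ===== VERDICT (by name: the statement is the Claim_ definition above) =====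
theorem less_popular_spec : Claim_equal_less_popular := by
  intro d _ hpre
  unfold Spec_less_popular less_popular less_popular_alt
  exact fold_eq d d [] (lookup_nodup d hpre)
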